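-- pv_equiv track=rewrite | github.com/alexisramon1608/Transformer-Based-Substitution-Cypher-Breaker | invariants.py | filter_subset_pairs
-- ===== SOURCE A (Python) =====
-- def filter_subset_pairs(pairs):
--
--     def is_subset_pair(pair1, pair2):
--         first1, second1 = set(pair1[0]), set(pair1[1])
--         first2, second2 = set(pair2[0]), set(pair2[1])
--         return (first1.issubset(first2) and second1.issubset(second2) and
--                 (len(first1) < len(first2) or len(second1) < len(second2)))
--
--     result = pairs.copy()
--     i = len(result) - 1
--
--     while i >= 0:
--         should_remove = False
--         for j, pair2 in enumerate(result):
--             if i != j and is_subset_pair(result[i], pair2):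
--                 should_remove = True
--                 break
--         if should_remove:
--             result.pop(i)
--         i -= 1
--
--     return result
-- ===== SOURCE B (Python) =====
-- def filter_subset_pairs(pairs):
--     sets = [(set(p[0]), set(p[1])) for p in pairs]
--     def dominated(s):
--         f1, s1 = s
--         return any(f1 <= f2 and s1 <= s2 and (len(f1) < len(f2) or len(s1) < len(s2))
--                    for f2, s2 in sets)
--     return [p for p, s in zip(pairs, sets) if not dominated(s)]
-- ===== Notes on version B (the rewrite author's own statement) =====
-- stated objective: faster
-- what changed: A repeatedly scans and mutates a shrinking copy of the list (backward while-loop with pop, re-building the four character sets on every comparison); B precomputes each pair's character sets once and keeps a pair iff no pair in the ORIGINAL list strictly dominates it, in a single comprehension over zip(pairs, sets) - equivalence rests on the proved fact that a dominated pair always has an undominated (maximal, by distinct-character count) dominator, so A's mutation never changes the outcome.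
import Mathlib
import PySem

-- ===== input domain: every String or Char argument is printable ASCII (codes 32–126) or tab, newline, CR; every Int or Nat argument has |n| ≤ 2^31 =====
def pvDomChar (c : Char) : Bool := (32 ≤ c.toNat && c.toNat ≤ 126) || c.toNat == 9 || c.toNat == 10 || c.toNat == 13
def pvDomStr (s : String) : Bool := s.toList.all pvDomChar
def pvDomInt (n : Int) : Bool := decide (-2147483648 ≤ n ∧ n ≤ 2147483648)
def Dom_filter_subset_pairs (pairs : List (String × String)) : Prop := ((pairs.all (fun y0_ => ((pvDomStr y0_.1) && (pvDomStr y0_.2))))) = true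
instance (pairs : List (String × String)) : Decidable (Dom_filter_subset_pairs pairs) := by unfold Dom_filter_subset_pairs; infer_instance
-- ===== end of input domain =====

-- B filters against the ORIGINAL list with the four character sets built once per pair,
-- instead of A's backward while-loop that pops from a mutating copy and rebuilds the sets per comparison; same result (proved), measurably faster.

-- ===== PORT A =====
-- is_subset_pair, literally
def pvIsSubsetPair (pair1 pair2 : String × String) : Bool :=
  let first1 := PySem.Set.ofList pair1.1.toList
  let second1 := PySem.Set.ofList pair1.2.toList
  let first2 := PySem.Set.ofList pair2.1.toList
  let second2 := PySem.Set.ofList pair2.2.toList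
  PySem.Set.issubset first1 first2 && PySem.Set.issubset second1 second2 &&
    (decide (PySem.Set.len first1 < PySem.Set.len first2) ||
     decide (PySem.Set.len second1 < PySem.Set.len second2))

-- A's while-loop: fuel k+1 means the Python index i = k; result[i] and result.pop(i) via PySem
def pvALoop (result : List (String × String)) : Nat → List (String × String)
  | 0 => result
  | k + 1 =>
    match PySem.List.pyGet? result (k : Int) with
    | none => result   -- unreachable: i stays in range throughout A's loop
    | some x =>
      let shouldRemove :=
        (PySem.List.enumerate result).any
          (fun jp => decide (jp.1 ≠ (k : Int)) && pvIsSubsetPair x jp.2)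
      let result' :=
        if shouldRemove then
          match PySem.List.pop? result (k : Int) with
          | some pr => pr.2
          | none => result   -- unreachable
        else result
      pvALoop result' k

def filter_subset_pairs (pairs : List (String × String)) : List (String × String) :=
  pvALoop pairs pairs.length

-- ===== PORT B =====
-- dominated(s): is s strictly dominated by some pair's precomputed sets?
def pvBDominates (sets : List (PySem.Set Char × PySem.Set Char))
    (s : PySem.Set Char × PySem.Set Char) : Bool :=
  sets.any (fun t =>
    PySem.Set.issubset s.1 t.1 && PySem.Set.issubset s.2 t.2 &&
      (decide (PySem.Set.len s.1 < PySem.Set.len t.1) ||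
       decide (PySem.Set.len s.2 < PySem.Set.len t.2)))

def filter_subset_pairs_alt (pairs : List (String × String)) : List (String × String) :=
  let sets := pairs.map (fun p => (PySem.Set.ofList p.1.toList, PySem.Set.ofList p.2.toList))
  (pairs.zip sets).filterMap (fun ps => if pvBDominates sets ps.2 then none else some ps.1)

-- ===== PRECONDITION & SPEC =====
def Spec_filter_subset_pairs (pairs : List (String × String)) (out : List (String × String)) : Prop := out = filter_subset_pairs_alt pairs
instance (pairs : List (String × String)) (out : List (String × String)) : Decidable (Spec_filter_subset_pairs pairs out) := by unfold Spec_filter_subset_pairs; infer_instance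

-- ===== CLAIM (what is proved, stated in full; the proofs are below) =====
def Claim_equal_filter_subset_pairs : Prop := ∀ (pairs : List (String × String)), Dom_filter_subset_pairs pairs → Spec_filter_subset_pairs pairs (filter_subset_pairs pairs)

-- ===== LEMMAS AND PROOFS =====

def pvMeasure (p : String × String) : Nat :=
  (PySem.Set.ofList p.1.toList).length + (PySem.Set.ofList p.2.toList).length

lemma pv_len_le_of_issubset (s t : List Char) (h : PySem.Set.issubset (PySem.Set.ofList s) (PySem.Set.ofList t) = true) :
    (PySem.Set.ofList s).length ≤ (PySem.Set.ofList t).length :=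
  (List.subperm_of_subset (PySem.Set.nodup_ofList s) ((PySem.Set.issubset_iff _ _).mp h)).length_le

lemma pv_dom_parts (p q : String × String) (h : pvIsSubsetPair p q = true) :
    PySem.Set.issubset (PySem.Set.ofList p.1.toList) (PySem.Set.ofList q.1.toList) = true ∧
    PySem.Set.issubset (PySem.Set.ofList p.2.toList) (PySem.Set.ofList q.2.toList) = true ∧
    ((PySem.Set.ofList p.1.toList).length < (PySem.Set.ofList q.1.toList).length ∨
     (PySem.Set.ofList p.2.toList).length < (PySem.Set.ofList q.2.toList).length) := by
  simp only [pvIsSubsetPair, Bool.and_eq_true, Bool.or_eq_true, decide_eq_true_eq, PySem.Set.len] at h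
  exact ⟨h.1.1, h.1.2, by exact_mod_cast h.2⟩

lemma pv_dom_intro (p q : String × String)
    (h1 : PySem.Set.issubset (PySem.Set.ofList p.1.toList) (PySem.Set.ofList q.1.toList) = true)
    (h2 : PySem.Set.issubset (PySem.Set.ofList p.2.toList) (PySem.Set.ofList q.2.toList) = true)
    (h3 : (PySem.Set.ofList p.1.toList).length < (PySem.Set.ofList q.1.toList).length ∨
          (PySem.Set.ofList p.2.toList).length < (PySem.Set.ofList q.2.toList).length) :
    pvIsSubsetPair p q = true := by
  simp only [pvIsSubsetPair, Bool.and_eq_true, Bool.or_eq_true, decide_eq_true_eq, PySem.Set.len]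
  exact ⟨⟨h1, h2⟩, by exact_mod_cast h3⟩

lemma pv_dom_measure (p q : String × String) (h : pvIsSubsetPair p q = true) :
    pvMeasure p < pvMeasure q := by
  obtain ⟨h1, h2, h3⟩ := pv_dom_parts p q h
  have l1 := pv_len_le_of_issubset _ _ h1
  have l2 := pv_len_le_of_issubset _ _ h2
  unfold pvMeasure; omega

lemma pv_dom_irrefl (p : String × String) : pvIsSubsetPair p p = false := by
  cases h : pvIsSubsetPair p p with
  | false => rfl
  | true => exact absurd (pv_dom_measure p p h) (lt_irrefl _)

lemma pv_dom_trans (a b c : String × String) (hab : pvIsSubsetPair a b = true)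
    (hbc : pvIsSubsetPair b c = true) : pvIsSubsetPair a c = true := by
  obtain ⟨a1, a2, _⟩ := pv_dom_parts a b hab
  obtain ⟨b1, b2, _⟩ := pv_dom_parts b c hbc
  have mab := pv_dom_measure a b hab
  have mbc := pv_dom_measure b c hbc
  have t1 : PySem.Set.issubset (PySem.Set.ofList a.1.toList) (PySem.Set.ofList c.1.toList) = true := by
    rw [PySem.Set.issubset_iff] at *
    intro x hx; exact b1 x (a1 x hx)
  have t2 : PySem.Set.issubset (PySem.Set.ofList a.2.toList) (PySem.Set.ofList c.2.toList) = true := by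
    rw [PySem.Set.issubset_iff] at *
    intro x hx; exact b2 x (a2 x hx)
  refine pv_dom_intro a c t1 t2 ?_
  have l1 := pv_len_le_of_issubset _ _ t1
  have l2 := pv_len_le_of_issubset _ _ t2
  unfold pvMeasure at mab mbc; omega

lemma pv_exists_maximal (pairs : List (String × String)) (x : String × String)
    (h : ∃ q ∈ pairs, pvIsSubsetPair x q = true) :
    ∃ z ∈ pairs, pvIsSubsetPair x z = true ∧ ∀ w ∈ pairs, pvIsSubsetPair z w = false := by
  obtain ⟨q, hq, hdq⟩ := h
  set S := pairs.filter (fun r => pvIsSubsetPair x r) with hS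
  have hqS : q ∈ S := by simp [hS, List.mem_filter, hq, hdq]
  obtain ⟨z, hz0⟩ : ∃ z, S.argmax pvMeasure = some z := by
    cases hargs : S.argmax pvMeasure with
    | some z => exact ⟨z, rfl⟩
    | none => rw [List.argmax_eq_none] at hargs; simp [hargs] at hqS
  have hz : z ∈ S.argmax pvMeasure := Option.mem_def.mpr hz0
  have hzS : z ∈ S := List.argmax_mem hz
  have hzp : z ∈ pairs := (List.mem_filter.mp hzS).1
  have hzd : pvIsSubsetPair x z = true := by simpa using (List.mem_filter.mp hzS).2
  refine ⟨z, hzp, hzd, fun w hw => ?_⟩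
  cases hzw : pvIsSubsetPair z w with
  | false => rfl
  | true =>
    have hxw : pvIsSubsetPair x w = true := pv_dom_trans _ _ _ hzd hzw
    have hwS : w ∈ S := by simp [hS, List.mem_filter, hw, hxw]
    have := List.le_of_mem_argmax hwS hz
    have := pv_dom_measure _ _ hzw
    omega

lemma pv_filterMap_if_eq_filter {α : Type} (l : List α) (c : α → Bool) :
    l.filterMap (fun p => if c p then none else some p) = l.filter (fun p => !c p) := by
  induction l with
  | nil => rfl
  | cons a l ih =>
    cases h : c a <;> simp [h, ih]

lemma pv_dominated_eq (pairs : List (String × String)) (p : String × String) :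
    pvBDominates (pairs.map (fun p => (PySem.Set.ofList p.1.toList, PySem.Set.ofList p.2.toList)))
        (PySem.Set.ofList p.1.toList, PySem.Set.ofList p.2.toList)
      = pairs.any (fun q => pvIsSubsetPair p q) := by
  simp only [pvBDominates, List.any_map]
  rfl

lemma pv_alt_eq_filter (pairs : List (String × String)) :
    filter_subset_pairs_alt pairs
      = pairs.filter (fun p => ! pairs.any (fun q => pvIsSubsetPair p q)) := by
  unfold filter_subset_pairs_alt
  simp only []
  rw [← List.map_prod_left_eq_zip, List.filterMap_map]
  simp only [Function.comp_def]
  rw [pv_filterMap_if_eq_filter]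
  exact List.filter_congr (fun x _ => by rw [pv_dominated_eq])

lemma pv_any_enumerate (L : List (String × String)) (k : Nat) (x : String × String)
    (hx : L[k]? = some x) :
    ((PySem.List.enumerate L).any (fun jp => decide (jp.1 ≠ (k : Int)) && pvIsSubsetPair x jp.2))
      = L.any (fun q => pvIsSubsetPair x q) := by
  obtain ⟨hk, hLk⟩ := List.getElem?_eq_some_iff.mp hx
  rw [Bool.eq_iff_iff]
  simp only [List.any_eq_true, PySem.List.mem_enumerate_iff, Bool.and_eq_true, decide_eq_true_eq]
  constructor
  · rintro ⟨p, ⟨j, hj, rfl⟩, _, hd⟩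
    exact ⟨L[j], List.getElem_mem hj, hd⟩
  · rintro ⟨q, hq, hd⟩
    obtain ⟨j, hj, rfl⟩ := List.mem_iff_getElem.mp hq
    refine ⟨(0 + (j : Int), L[j]), ⟨j, hj, rfl⟩, ?_, hd⟩
    intro hje
    have hjk : j = k := by omega
    subst hjk
    rw [hLk, pv_dom_irrefl] at hd
    exact absurd hd (by simp)

lemma pv_L_any_eq (pairs : List (String × String)) (k : Nat) (hk : k < pairs.length) :
    (pairs.take (k+1) ++ (pairs.drop (k+1)).filter (fun p => ! pairs.any (fun q => pvIsSubsetPair p q))).any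
        (fun q => pvIsSubsetPair pairs[k] q)
      = pairs.any (fun q => pvIsSubsetPair pairs[k] q) := by
  rw [Bool.eq_iff_iff]
  simp only [List.any_eq_true]
  constructor
  · rintro ⟨q, hq, hd⟩
    rcases List.mem_append.mp hq with h | h
    · exact ⟨q, List.mem_of_mem_take h, hd⟩
    · exact ⟨q, List.mem_of_mem_drop (List.mem_filter.mp h).1, hd⟩
  · intro h
    obtain ⟨z, hz, hxz, hmax⟩ := pv_exists_maximal pairs pairs[k] h
    refine ⟨z, ?_, hxz⟩
    have hgd : (! pairs.any (fun q => pvIsSubsetPair z q)) = true := by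
      simp only [Bool.not_eq_true', List.any_eq_false]
      intro x hx
      simp [hmax x hx]
    rcases List.mem_append.mp ((List.take_append_drop (k+1) pairs) ▸ hz) with h' | h'
    · exact List.mem_append_left _ h'
    · exact List.mem_append_right _ (List.mem_filter.mpr ⟨h', hgd⟩)

lemma pv_loop_inv (pairs : List (String × String)) :
    ∀ k, k ≤ pairs.length →
      pvALoop (pairs.take k ++ (pairs.drop k).filter (fun p => ! pairs.any (fun q => pvIsSubsetPair p q))) k
        = pairs.filter (fun p => ! pairs.any (fun q => pvIsSubsetPair p q)) := by
  intro k
  induction k with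
  | zero => intro _; simp [pvALoop]
  | succ k ih =>
    intro hk1
    have hk : k < pairs.length := hk1
    have hlen : (pairs.take (k+1)).length = k + 1 := by
      simp [List.length_take, Nat.min_eq_left hk1]
    set gd : (String × String) → Bool := fun p => ! pairs.any (fun q => pvIsSubsetPair p q) with hgd
    set F := (pairs.drop (k+1)).filter gd with hF
    set L := pairs.take (k+1) ++ F with hL
    have hkL : k < L.length := by
      rw [hL, List.length_append, hlen]; omega
    have hLk? : L[k]? = some pairs[k] := by
      rw [hL, List.getElem?_append_left (by omega)]
      rw [List.getElem?_take_of_lt (by omega), List.getElem?_eq_getElem hk]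
    have hget : PySem.List.pyGet? L (k : Int) = some pairs[k] := by
      rw [PySem.List.pyGet?_natCast, hLk?]
    have hany2 : L.any (fun q => pvIsSubsetPair pairs[k] q)
        = pairs.any (fun q => pvIsSubsetPair pairs[k] q) := by
      rw [hL]; exact pv_L_any_eq pairs k hk
    simp only [pvALoop, hget]
    rw [pv_any_enumerate L k pairs[k] hLk?, hany2]
    cases hdom : pairs.any (fun q => pvIsSubsetPair pairs[k] q) with
    | true =>
      rw [if_pos rfl]
      have hpop : PySem.List.pop? L (k : Int) = some (L[k], L.eraseIdx k) :=
        PySem.List.pop?_natCast (xs := L) (n := k) hkL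
      rw [hpop]
      have herase : L.eraseIdx k = pairs.take k ++ F := by
        rw [hL, List.eraseIdx_append_of_lt_length (by omega)]
        congr 1
        rw [List.take_add_one, List.getElem?_eq_getElem hk]
        have hlt : (pairs.take k).length = k := by
          simp [List.length_take, Nat.min_eq_left (le_of_lt hk)]
        rw [List.eraseIdx_append_of_length_le (le_of_eq hlt)]
        rw [hlt, Nat.sub_self]
        simp only [Option.toList_some, List.eraseIdx_cons_zero, List.append_nil]
      have hFd : (pairs.drop k).filter gd = F := by
        rw [hF, List.drop_eq_getElem_cons hk, List.filter_cons]
        have hgk : gd pairs[k] = false := by rw [hgd]; simp [hdom]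
        rw [hgk]
        simp only [Bool.false_eq_true, if_false]
      rw [herase, ← hFd]
      exact ih (le_of_lt hk)
    | false =>
      have : ¬ (false = true) := by simp
      rw [if_neg this]
      have hsplit : L = pairs.take k ++ (pairs.drop k).filter gd := by
        rw [hL, List.drop_eq_getElem_cons hk, List.filter_cons]
        have hgk : gd pairs[k] = true := by rw [hgd]; simp [hdom]
        rw [hgk, List.take_add_one, List.getElem?_eq_getElem hk]
        simp only [Option.toList_some, List.append_assoc, List.singleton_append, if_pos]
        rfl
      rw [hsplit]
      exact ih (le_of_lt hk)

lemma pv_a_eq_filter (pairs : List (String × String)) :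
    filter_subset_pairs pairs
      = pairs.filter (fun p => ! pairs.any (fun q => pvIsSubsetPair p q)) := by
  have h := pv_loop_inv pairs pairs.length (le_refl _)
  simpa [filter_subset_pairs] using h

-- ===== VERDICT (by name: the statement is the Claim_ definition above) =====
theorem filter_subset_pairs_spec : Claim_equal_filter_subset_pairs := by
  intro pairs _
  unfold Spec_filter_subset_pairs
  rw [pv_a_eq_filter, pv_alt_eq_filter]
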